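-- pv_equiv track=rewrite | github.com/Xinglab/espresso | snakemake/scripts/split_espresso_s_output_for_c.py | get_next_group_and_c_dirs
-- ===== SOURCE A (Python) =====
-- def get_next_group_and_c_dirs(state_by_orig_c_dir):
--     group = None
--     c_dirs = list()
--     for c_dir, state in state_by_orig_c_dir.items():
--         dir_group = state['group']
--         if dir_group is None:
--             # no more groups in this c_dir
--             continue
--
--         if group is None:
--             group = dir_group
--             c_dirs.append(c_dir)
--             continue
--
--         if dir_group < group:
--             group = dir_group
--             c_dirs = [c_dir]
--         elif dir_group == group:
--             c_dirs.append(c_dir)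
--
--     # Ensure that the reads are processed in a consistent order
--     # when multiple c_dirs have reads for the same group.
--     c_dirs.sort()
--     return group, c_dirs
-- ===== SOURCE B (Python) =====
-- def get_next_group_and_c_dirs(state_by_orig_c_dir):
--     groups = [state['group'] for state in state_by_orig_c_dir.values()
--               if state['group'] is not None]
--     if not groups:
--         return None, []
--     min_group = min(groups)
--     c_dirs = sorted(c_dir for c_dir, state in state_by_orig_c_dir.items()
--                     if state['group'] == min_group)
--     return min_group, c_dirs
-- ===== Notes on version B (the rewrite author's own statement) =====
-- stated objective: simpler
-- what changed: Replaces A's single running-best loop (tracking the current minimum group and resetting/appending a c_dirs accumulator) with a two-phase computation: collect the non-None groups, take the built-in minimum, then build c_dirs as a sorted filter over the entries whose group equals that minimum; the empty-collection case yields the None result directly.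
import Mathlib
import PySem

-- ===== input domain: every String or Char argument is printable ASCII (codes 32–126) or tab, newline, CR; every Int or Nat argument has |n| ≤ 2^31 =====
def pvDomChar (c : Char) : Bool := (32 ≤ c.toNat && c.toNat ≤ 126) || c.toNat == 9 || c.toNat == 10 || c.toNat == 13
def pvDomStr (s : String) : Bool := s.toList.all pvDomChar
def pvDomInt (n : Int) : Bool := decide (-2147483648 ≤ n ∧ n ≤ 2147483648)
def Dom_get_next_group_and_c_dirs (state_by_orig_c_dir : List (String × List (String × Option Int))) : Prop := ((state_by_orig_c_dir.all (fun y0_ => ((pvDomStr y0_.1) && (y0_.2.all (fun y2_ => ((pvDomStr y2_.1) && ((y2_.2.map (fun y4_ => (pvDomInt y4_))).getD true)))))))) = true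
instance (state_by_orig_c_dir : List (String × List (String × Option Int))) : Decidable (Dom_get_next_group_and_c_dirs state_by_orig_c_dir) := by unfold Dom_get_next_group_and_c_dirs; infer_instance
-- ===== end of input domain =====

-- B replaces A's running-minimum loop with a two-phase min-then-filter; objective: simpler.

-- state['group'] : first-match lookup of the "group" key in the inner dict (both Pythons do this lookup)
def grp (st : List (String × Option Int)) : Option Int :=
  ((PySem.Dict.mk st).get? "group").getD none

-- ===== PORT A =====
-- A's loop body: running minimum group with an accumulated / reset c_dirs list
def stepA (acc : Option Int × List String) (p : String × List (String × Option Int)) :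
    Option Int × List String :=
  match grp p.2 with
  | none => acc
  | some dir_group =>
    match acc.1 with
    | none => (some dir_group, acc.2 ++ [p.1])
    | some group =>
      if dir_group < group then (some dir_group, [p.1])
      else if dir_group = group then (some group, acc.2 ++ [p.1])
      else acc

def get_next_group_and_c_dirs (state_by_orig_c_dir : List (String × List (String × Option Int))) : Option Int × List String :=
  let r := state_by_orig_c_dir.foldl stepA ((none : Option Int), ([] : List String))
  (r.1, PySem.List.sorted r.2 (fun x => x) false)

-- ===== PORT B =====
-- the non-None groups, in order
def gs (l : List (String × List (String × Option Int))) : List Int :=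
  l.filterMap (fun p => grp p.2)

-- the c_dirs whose group equals m, in order
def eqKeys (l : List (String × List (String × Option Int))) (m : Int) : List String :=
  l.filterMap (fun p => if grp p.2 = some m then some p.1 else none)

def get_next_group_and_c_dirs_alt (state_by_orig_c_dir : List (String × List (String × Option Int))) : Option Int × List String :=
  match PySem.List.min? (gs state_by_orig_c_dir) (fun x => x) with
  | none => (none, [])
  | some m => (some m, PySem.List.sorted (eqKeys state_by_orig_c_dir m) (fun x => x) false)

-- ===== PRECONDITION & SPEC =====
-- Python A evaluates state['group'] for every entry: Pre_ excludes exactly the inputs where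
-- some inner dict lacks the "group" key (Python raises KeyError there).
def Pre_get_next_group_and_c_dirs (state_by_orig_c_dir : List (String × List (String × Option Int))) : Prop :=
  (state_by_orig_c_dir.all (fun p => p.2.any (fun q => q.1 == "group"))) = true
instance (state_by_orig_c_dir : List (String × List (String × Option Int))) : Decidable (Pre_get_next_group_and_c_dirs state_by_orig_c_dir) := by unfold Pre_get_next_group_and_c_dirs; infer_instance
def pvWitness_get_next_group_and_c_dirs : (List (String × List (String × Option Int))) :=
  [("a", [("group", some 1)]), ("b", [("group", none)])]
def Spec_get_next_group_and_c_dirs (state_by_orig_c_dir : List (String × List (String × Option Int))) (out : Option Int × List String) : Prop := out = get_next_group_and_c_dirs_alt state_by_orig_c_dir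
instance (state_by_orig_c_dir : List (String × List (String × Option Int))) (out : Option Int × List String) : Decidable (Spec_get_next_group_and_c_dirs state_by_orig_c_dir out) := by unfold Spec_get_next_group_and_c_dirs; infer_instance

-- ===== CLAIM (what is proved, stated in full; the proofs are below) =====
def Claim_equal_get_next_group_and_c_dirs : Prop := ∀ (state_by_orig_c_dir : List (String × List (String × Option Int))), Dom_get_next_group_and_c_dirs state_by_orig_c_dir → Pre_get_next_group_and_c_dirs state_by_orig_c_dir → Spec_get_next_group_and_c_dirs state_by_orig_c_dir (get_next_group_and_c_dirs state_by_orig_c_dir)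

-- ===== LEMMAS AND PROOFS =====

theorem foldl_min_le (l : List Int) (a : Int) : l.foldl min a ≤ a := by
  induction l generalizing a with
  | nil => simp
  | cons x t ih => exact le_trans (ih (min a x)) (min_le_left a x)

-- A's loop from a (some cur, cs) accumulator: the final group is the running minimum,
-- and c_dirs is either reset (a strictly smaller group occurred) or extends cs
theorem fold_some (l : List (String × List (String × Option Int))) (cur : Int) (cs : List String) :
    l.foldl stepA (some cur, cs) =
      (some ((gs l).foldl min cur),
       (if (gs l).foldl min cur < cur then [] else cs) ++ eqKeys l ((gs l).foldl min cur)) := by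
  induction l generalizing cur cs with
  | nil => simp [gs, eqKeys]
  | cons p t ih =>
    simp only [List.foldl_cons]
    rcases hg : grp p.2 with _ | g
    · rw [show stepA (some cur, cs) p = (some cur, cs) by simp [stepA, hg], ih]
      have h1 : gs (p :: t) = gs t := by simp [gs, hg]
      have h2 : ∀ m, eqKeys (p :: t) m = eqKeys t m := by intro m; simp [eqKeys, hg]
      rw [h1, h2]
    · have hmle : (gs t).foldl min g ≤ g := foldl_min_le _ _
      have hcons : gs (p :: t) = g :: gs t := by simp [gs, hg]
      by_cases h1 : g < cur
      · -- dir_group < group : reset c_dirs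
        rw [show stepA (some cur, cs) p = (some g, [p.1]) by simp [stepA, hg, h1], ih]
        have hM : (gs (p :: t)).foldl min cur = (gs t).foldl min g := by
          rw [hcons]; simp [min_eq_right h1.le]
        rw [hM, if_pos (lt_of_le_of_lt hmle h1), List.nil_append]
        rcases lt_or_eq_of_le hmle with h | h
        · have hne : grp p.2 ≠ some ((gs t).foldl min g) := by
            rw [hg]; intro hc; injection hc with hc; omega
          rw [if_pos h]
          simp [eqKeys, hne]
        · rw [h, if_neg (lt_irrefl g)]
          simp [eqKeys, hg]
      · by_cases h2 : g = cur
        · -- dir_group == group : append c_dir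
          subst h2
          rw [show stepA (some g, cs) p = (some g, cs ++ [p.1]) by simp [stepA, hg], ih]
          have hM : (gs (p :: t)).foldl min g = (gs t).foldl min g := by
            rw [hcons]; simp
          rw [hM]
          rcases lt_or_eq_of_le hmle with h | h
          · have hne : grp p.2 ≠ some ((gs t).foldl min g) := by
              rw [hg]; intro hc; injection hc with hc; omega
            rw [if_pos h, if_pos h]
            simp [eqKeys, hne]
          · rw [h, if_neg (lt_irrefl g), if_neg (lt_irrefl g)]
            simp [eqKeys, hg]
        · -- dir_group > group : skip
          have hgt : cur < g := lt_of_le_of_ne (le_of_not_gt h1) (Ne.symm h2)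
          rw [show stepA (some cur, cs) p = (some cur, cs) by simp [stepA, hg, h1, h2], ih]
          have hM : (gs (p :: t)).foldl min cur = (gs t).foldl min cur := by
            rw [hcons]; simp [min_eq_left hgt.le]
          rw [hM]
          have hne : grp p.2 ≠ some ((gs t).foldl min cur) := by
            rw [hg]; intro hc; injection hc with hc
            have := foldl_min_le (gs t) cur; omega
          simp [eqKeys, hne]

-- A's full loop from the initial (None, []) accumulator equals B's min-then-filter
theorem fold_none (l : List (String × List (String × Option Int))) :
    l.foldl stepA ((none : Option Int), ([] : List String)) =
      match PySem.List.min? (gs l) (fun x => x) with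
      | none => (none, [])
      | some m => (some m, eqKeys l m) := by
  induction l with
  | nil => simp [gs, PySem.List.min?]
  | cons p t ih =>
    simp only [List.foldl_cons]
    rcases hg : grp p.2 with _ | g
    · rw [show stepA (none, []) p = (none, []) by simp [stepA, hg], ih]
      have h1 : gs (p :: t) = gs t := by simp [gs, hg]
      rw [h1]
      rcases hm : PySem.List.min? (gs t) (fun x => x) with _ | m
      · rfl
      · simp only []
        congr 1
        simp [eqKeys, hg]
    · rw [show stepA (none, []) p = (some g, [p.1]) by simp [stepA, hg]]
      rw [fold_some]
      have hcons : gs (p :: t) = g :: gs t := by simp [gs, hg]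
      rw [hcons, PySem.List.min?_id_cons]
      have hmle : (gs t).foldl min g ≤ g := foldl_min_le _ _
      simp only []
      congr 1
      rcases lt_or_eq_of_le hmle with h | h
      · have hne : grp p.2 ≠ some ((gs t).foldl min g) := by
          rw [hg]; intro hc; injection hc with hc; omega
        rw [if_pos h]
        simp [eqKeys, hne]
      · rw [h, if_neg (lt_irrefl g)]
        simp [eqKeys, hg]

-- ===== VERDICT (by name: the statement is the Claim_ definition above) =====
theorem get_next_group_and_c_dirs_spec : Claim_equal_get_next_group_and_c_dirs := by
  intro l _ _
  unfold Spec_get_next_group_and_c_dirs get_next_group_and_c_dirs get_next_group_and_c_dirs_alt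
  rw [fold_none]
  rcases hm : PySem.List.min? (gs l) (fun x => x) with _ | m
  · simp [PySem.List.sorted]
  · simp
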